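-- pv_equiv track=rewrite | github.com/rpask00/algroytmy | Dynamic Programming/Minimum Initial Points to Reach Destination.py | initialVal
-- ===== SOURCE A (Python) =====
-- def initialVal(matrix):
--     height = len(matrix)
--     width = len(matrix[0])
--     lmax = width-1
--     bmax = height-1
--
--     dp = [[0 for i in range(width)] for x in range(height)]
--
--     for y in range(bmax, -1, -1):
--         for x in range(lmax, -1, -1):
--
--             if x == lmax and y == bmax:
--                 dp[y][x] = max([1-matrix[y][x], 1])
--                 continue
--
--             elif x == lmax:
--                 dp[y][x] = max([dp[y+1][x] - matrix[y][x], 1])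
--
--             elif y == bmax:
--                 dp[y][x] = max([dp[y][x+1] - matrix[y][x], 1])
--             else:
--                 min_on_exit = min([dp[y+1][x], dp[y][x+1]])
--                 dp[y][x] = max([min_on_exit - matrix[y][x], 1])
--
--     return dp[0][0]
-- ===== SOURCE B (Python) =====
-- def initialVal(matrix):
--     h = len(matrix)
--     w = len(matrix[0])
--     memo = {}
--     stack = [(0, 0, False)]
--     while stack:
--         y, x, ready = stack.pop()
--         if (y, x) in memo:
--             continue
--         if not ready:
--             stack.append((y, x, True))
--             if y + 1 < h and (y + 1, x) not in memo:
--                 stack.append((y + 1, x, False))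
--             if x + 1 < w and (y, x + 1) not in memo:
--                 stack.append((y, x + 1, False))
--         else:
--             if y + 1 < h and x + 1 < w:
--                 need = min(memo[(y + 1, x)], memo[(y, x + 1)])
--             elif y + 1 < h:
--                 need = memo[(y + 1, x)]
--             elif x + 1 < w:
--                 need = memo[(y, x + 1)]
--             else:
--                 need = 1
--             memo[(y, x)] = max(need - matrix[y][x], 1)
--     return memo[(0, 0)]
-- ===== Notes on version B (the rewrite author's own statement) =====
-- stated objective: alternative
-- what changed: Replaces A's bottom-up fill of a full 2D dp table (nested reversed index loops) by a demand-driven top-down evaluation: an explicit DFS stack of (cell, phase) entries starting from (0,0) memoizes each cell's requirement in a dict once its two successors are known, so only cells reachable from the top-left are ever computed and no dp matrix exists.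
import Mathlib
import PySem

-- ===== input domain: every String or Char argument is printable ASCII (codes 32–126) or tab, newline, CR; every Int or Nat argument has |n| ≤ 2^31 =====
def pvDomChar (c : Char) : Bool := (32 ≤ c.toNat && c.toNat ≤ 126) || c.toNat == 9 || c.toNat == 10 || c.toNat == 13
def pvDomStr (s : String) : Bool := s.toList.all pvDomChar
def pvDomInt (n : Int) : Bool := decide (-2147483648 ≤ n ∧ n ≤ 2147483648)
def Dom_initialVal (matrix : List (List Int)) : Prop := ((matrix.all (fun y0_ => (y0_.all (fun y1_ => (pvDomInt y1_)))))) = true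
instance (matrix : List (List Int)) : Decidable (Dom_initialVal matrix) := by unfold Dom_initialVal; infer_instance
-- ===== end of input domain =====

-- B replaces A's bottom-up fill of a full 2D dp table by a demand-driven top-down evaluation:
-- an explicit DFS stack of (cell, phase) entries starting from (0,0) memoizes each cell once
-- its successors are known; same values, no dp matrix (objective: alternative, not faster).

-- ===== PORT A =====
-- dp[y][x] = v  (indices in range whenever Python A returns)
def aSet (dp : List (List Int)) (y x v : Int) : List (List Int) :=
  PySem.List.pySetD dp y (PySem.List.pySetD (PySem.List.pyGetD dp y []) x v)

-- the body of A's inner loop, branch for branch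
def aStep (matrix : List (List Int)) (bmax lmax y : Int) (dp : List (List Int)) (x : Int) : List (List Int) :=
  let m := PySem.List.pyGetD (PySem.List.pyGetD matrix y []) x 0
  if x = lmax ∧ y = bmax then
    aSet dp y x (max (1 - m) 1)
  else if x = lmax then
    aSet dp y x (max (PySem.List.pyGetD (PySem.List.pyGetD dp (y + 1) []) x 0 - m) 1)
  else if y = bmax then
    aSet dp y x (max (PySem.List.pyGetD (PySem.List.pyGetD dp y []) (x + 1) 0 - m) 1)
  else
    let minExit := min (PySem.List.pyGetD (PySem.List.pyGetD dp (y + 1) []) x 0)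
                       (PySem.List.pyGetD (PySem.List.pyGetD dp y []) (x + 1) 0)
    aSet dp y x (max (minExit - m) 1)

def initialVal (matrix : List (List Int)) : Int :=
  let height : Int := matrix.length
  let width : Int := (PySem.List.pyGetD matrix 0 []).length
  let lmax := width - 1
  let bmax := height - 1
  let dp0 := (PySem.List.pyRange 0 height 1).map (fun _ => (PySem.List.pyRange 0 width 1).map (fun _ => (0 : Int)))
  let dp := (PySem.List.pyRange bmax (-1) (-1)).foldl
      (fun dp y => (PySem.List.pyRange lmax (-1) (-1)).foldl (aStep matrix bmax lmax y) dp) dp0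
  PySem.List.pyGetD (PySem.List.pyGetD dp 0 []) 0 0

-- ===== PORT B =====
-- termination weight of a pending (not yet memoized) cell at grid distance (a, b)
-- from the bottom/right edges; cited by bLoop's decreasing_by only
def pvV (a b : Nat) : Nat :=
  2 + (if h1 : 2 ≤ a then pvV (a - 1) b else 0) + (if h2 : 2 ≤ b then pvV a (b - 1) else 0)
termination_by a + b
decreasing_by
  · exact Nat.add_lt_add_right (Nat.sub_lt (Nat.lt_of_lt_of_le Nat.zero_lt_two h1) Nat.zero_lt_one) b
  · exact Nat.add_lt_add_left (Nat.sub_lt (Nat.lt_of_lt_of_le Nat.zero_lt_two h2) Nat.zero_lt_one) a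

lemma pvV_pos (a b : Nat) : 2 ≤ pvV a b := by
  rw [pvV.eq_def]
  exact le_trans (Nat.le_add_right 2 _) (Nat.le_add_right _ _)

lemma pvV_down {a : Nat} (b : Nat) (h : 2 ≤ a) : pvV (a - 1) b + 2 ≤ pvV a b := by
  rw [pvV.eq_def a b, dif_pos h]
  calc pvV (a - 1) b + 2 = 2 + pvV (a - 1) b := Nat.add_comm _ _
    _ ≤ 2 + pvV (a - 1) b + _ := Nat.le_add_right _ _

lemma pvV_right (a : Nat) {b : Nat} (h : 2 ≤ b) : pvV a (b - 1) + 2 ≤ pvV a b := by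
  rw [pvV.eq_def a b, dif_pos h]
  exact le_of_eq_of_le (Nat.add_comm _ 2)
    (Nat.add_le_add_right (Nat.le_add_right 2 _) (pvV a (b - 1)))

lemma pvV_both {a b : Nat} (ha : 2 ≤ a) (hb : 2 ≤ b) :
    pvV a (b - 1) + pvV (a - 1) b + 2 ≤ pvV a b := by
  rw [pvV.eq_def a b, dif_pos ha, dif_pos hb]
  refine Nat.le_of_eq ?_
  rw [Nat.add_comm (pvV a (b - 1)) (pvV (a - 1) b), Nat.add_comm _ 2, Nat.add_assoc]

-- the pure-Nat decrease cores of the termination argument (one per push pattern)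
lemma pvCore_both {A B S : Nat} (hA : 2 ≤ A) (hB : 2 ≤ B) :
    pvV A (B - 1) + pvV (A - 1) B + (1 + S) < pvV A B + S := by
  have h1 : pvV A (B - 1) + pvV (A - 1) B + 1 < pvV A B :=
    Nat.lt_of_lt_of_le (Nat.add_lt_add_left Nat.one_lt_two _) (pvV_both hA hB)
  calc pvV A (B - 1) + pvV (A - 1) B + (1 + S)
      = pvV A (B - 1) + pvV (A - 1) B + 1 + S := (Nat.add_assoc _ 1 S).symm
    _ < pvV A B + S := Nat.add_lt_add_right h1 S

lemma pvCore_down {A B S : Nat} (hA : 2 ≤ A) :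
    pvV (A - 1) B + (1 + S) < pvV A B + S := by
  have h1 : pvV (A - 1) B + 1 < pvV A B :=
    Nat.lt_of_lt_of_le (Nat.add_lt_add_left Nat.one_lt_two _) (pvV_down B hA)
  calc pvV (A - 1) B + (1 + S) = pvV (A - 1) B + 1 + S := (Nat.add_assoc _ 1 S).symm
    _ < pvV A B + S := Nat.add_lt_add_right h1 S

lemma pvCore_right {A B S : Nat} (hB : 2 ≤ B) :
    pvV A (B - 1) + (1 + S) < pvV A B + S := by
  have h1 : pvV A (B - 1) + 1 < pvV A B :=
    Nat.lt_of_lt_of_le (Nat.add_lt_add_left Nat.one_lt_two _) (pvV_right A hB)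
  calc pvV A (B - 1) + (1 + S) = pvV A (B - 1) + 1 + S := (Nat.add_assoc _ 1 S).symm
    _ < pvV A B + S := Nat.add_lt_add_right h1 S

lemma pvCore_none {A B S : Nat} : 1 + S < pvV A B + S :=
  Nat.add_lt_add_right (Nat.lt_of_lt_of_le Nat.one_lt_two (pvV_pos A B)) S

-- weight of a stack entry: exit markers weigh 1, pending cells their pvV weight
def pvWeight (h w : Int) : Int × Int × Bool → Nat
  | (_, _, true) => 1
  | (y, x, false) => pvV (h - y).toNat (w - x).toNat

lemma pvWeight_pos (h w : Int) (e : Int × Int × Bool) : 1 ≤ pvWeight h w e := by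
  rcases e with ⟨y, x, r⟩
  cases r
  · exact le_trans one_le_two (pvV_pos _ _)
  · exact Nat.le_refl 1

lemma pvTail_lt (h w : Int) (e : Int × Int × Bool) (rest : List (Int × Int × Bool)) :
    ((rest.map (pvWeight h w)).sum) < (((e :: rest).map (pvWeight h w)).sum) := by
  simp only [List.map_cons, List.sum_cons]
  exact Nat.lt_add_of_pos_left (pvWeight_pos h w e)

lemma pvToNat_two {u v : Int} (h : u + 1 < v) : 2 ≤ (v - u).toNat := by
  have h3 : u + 1 + 1 ≤ v := Int.add_one_le_iff.mpr h
  rw [Int.add_assoc] at h3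
  have h2 : (2 : Int) ≤ v - u := Int.le_sub_left_of_add_le h3
  exact (Int.le_toNat (le_trans (by decide) h2)).mpr h2

lemma pvToNat_pred {u v : Int} : (v - (u + 1)).toNat = (v - u).toNat - 1 := by
  rw [sub_add_eq_sub_sub, Int.pred_toNat]

lemma pvExpand_lt (h w y x : Int) (rest : List (Int × Int × Bool))
    (p q : Prop) [Decidable p] [Decidable q]
    (hp : p → x + 1 < w) (hq : q → y + 1 < h) (r : Bool) (hr : ¬ r = true) :
    (((dite p (fun _ => [(y, x + 1, false)]) (fun _ => []))
        ++ (dite q (fun _ => [(y + 1, x, false)]) (fun _ => []))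
        ++ (y, x, true) :: rest).map (pvWeight h w)).sum
      < (((y, x, r) :: rest).map (pvWeight h w)).sum := by
  rw [Bool.not_eq_true] at hr
  subst hr
  simp only [List.map_append, List.sum_append, List.map_cons, List.sum_cons]
  split_ifs with hP hQ hQ
  · simp only [pvWeight, List.map_cons, List.map_nil, List.sum_cons, List.sum_nil,
      Nat.add_zero, pvToNat_pred]
    exact pvCore_both (pvToNat_two (hq hQ)) (pvToNat_two (hp hP))
  · simp only [pvWeight, List.map_cons, List.map_nil, List.sum_cons, List.sum_nil,
      Nat.add_zero, Nat.zero_add, pvToNat_pred]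
    exact pvCore_right (pvToNat_two (hp hP))
  · simp only [pvWeight, List.map_cons, List.map_nil, List.sum_cons, List.sum_nil,
      Nat.add_zero, Nat.zero_add, pvToNat_pred]
    exact pvCore_down (pvToNat_two (hq hQ))
  · simp only [pvWeight, List.map_nil, List.sum_nil, Nat.zero_add]
    exact pvCore_none

-- B's while loop; the stack's head is Python's stack[-1] (append/pop at the end).
-- memo[(..)] reads (which Python only performs on keys proved present) are getD 0.
def bLoop (matrix : List (List Int)) (h w : Int) (stack : List (Int × Int × Bool))
    (memo : PySem.Dict (Int × Int) Int) : PySem.Dict (Int × Int) Int :=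
  match stack with
  | [] => memo
  | (y, x, ready) :: rest =>
    if memo.contains (y, x) then bLoop matrix h w rest memo
    else if ready then
      bLoop matrix h w rest
        (memo.insert (y, x) (max ((if y + 1 < h ∧ x + 1 < w then
              min (memo.getD (y + 1, x) 0) (memo.getD (y, x + 1) 0)
            else if y + 1 < h then memo.getD (y + 1, x) 0
            else if x + 1 < w then memo.getD (y, x + 1) 0
            else 1) - PySem.List.pyGetD (PySem.List.pyGetD matrix y []) x 0) 1))
    else
      bLoop matrix h w
        ((if x + 1 < w ∧ ¬ memo.contains (y, x + 1) then [(y, x + 1, false)] else [])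
          ++ (if y + 1 < h ∧ ¬ memo.contains (y + 1, x) then [(y + 1, x, false)] else [])
          ++ (y, x, true) :: rest) memo
termination_by (stack.map (pvWeight h w)).sum
decreasing_by
  · exact pvTail_lt h w _ rest
  · exact pvTail_lt h w _ rest
  · rename_i hc0 hr0
    exact pvExpand_lt h w y x rest (x + 1 < w ∧ ¬ memo.contains (y, x + 1) = true)
      (y + 1 < h ∧ ¬ memo.contains (y + 1, x) = true) (fun hc => hc.1) (fun hc => hc.1) ready hr0

def initialVal_alt (matrix : List (List Int)) : Int :=
  let h : Int := matrix.length
  let w : Int := (PySem.List.pyGetD matrix 0 []).length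
  (bLoop matrix h w [(0, 0, false)] PySem.Dict.empty).getD (0, 0) 0

-- ===== PRECONDITION & SPEC =====
-- Pre_ excludes exactly the inputs where Python A raises: the empty matrix, a first row of
-- width 0 (dp[0][0] IndexError), and a later row shorter than the first (matrix[y][x] IndexError).
def Pre_initialVal (matrix : List (List Int)) : Prop :=
  matrix ≠ [] ∧ 1 ≤ matrix.headI.length ∧ ∀ row ∈ matrix, matrix.headI.length ≤ row.length
instance (matrix : List (List Int)) : Decidable (Pre_initialVal matrix) := by
  unfold Pre_initialVal; infer_instance

def pvWitness_initialVal : List (List Int) := [[-2, 3], [1, -5]]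

def Spec_initialVal (matrix : List (List Int)) (out : Int) : Prop := out = initialVal_alt matrix
instance (matrix : List (List Int)) (out : Int) : Decidable (Spec_initialVal matrix out) := by
  unfold Spec_initialVal; infer_instance

-- ===== CLAIM (what is proved, stated in full; the proofs are below) =====
def Claim_equal_initialVal : Prop :=
  ∀ (matrix : List (List Int)), Dom_initialVal matrix → Pre_initialVal matrix →
    Spec_initialVal matrix (initialVal matrix)

-- ===== LEMMAS AND PROOFS =====

-- the mathematical dp value of a cell (proof-side reference function for both ports)
def dpI (matrix : List (List Int)) (h w y x : Int) : Int :=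
  if hI : y + 1 < h ∧ x + 1 < w then
    max (min (dpI matrix h w (y + 1) x) (dpI matrix h w y (x + 1))
          - PySem.List.pyGetD (PySem.List.pyGetD matrix y []) x 0) 1
  else if hD : y + 1 < h then
    max (dpI matrix h w (y + 1) x - PySem.List.pyGetD (PySem.List.pyGetD matrix y []) x 0) 1
  else if hR : x + 1 < w then
    max (dpI matrix h w y (x + 1) - PySem.List.pyGetD (PySem.List.pyGetD matrix y []) x 0) 1
  else
    max (1 - PySem.List.pyGetD (PySem.List.pyGetD matrix y []) x 0) 1
termination_by (h - y).toNat + (w - x).toNat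
decreasing_by all_goals omega

lemma dpI_interior {matrix : List (List Int)} {h w y x : Int} (hD : y + 1 < h) (hR : x + 1 < w) :
    dpI matrix h w y x
      = max (min (dpI matrix h w (y + 1) x) (dpI matrix h w y (x + 1))
          - PySem.List.pyGetD (PySem.List.pyGetD matrix y []) x 0) 1 := by
  rw [dpI.eq_def, dif_pos ⟨hD, hR⟩]

lemma dpI_down {matrix : List (List Int)} {h w y x : Int} (hD : y + 1 < h) (hR : ¬ x + 1 < w) :
    dpI matrix h w y x
      = max (dpI matrix h w (y + 1) x - PySem.List.pyGetD (PySem.List.pyGetD matrix y []) x 0) 1 := by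
  rw [dpI.eq_def, dif_neg (fun hc => hR hc.2), dif_pos hD]

lemma dpI_right {matrix : List (List Int)} {h w y x : Int} (hD : ¬ y + 1 < h) (hR : x + 1 < w) :
    dpI matrix h w y x
      = max (dpI matrix h w y (x + 1) - PySem.List.pyGetD (PySem.List.pyGetD matrix y []) x 0) 1 := by
  rw [dpI.eq_def, dif_neg (fun hc => hD hc.1), dif_neg hD, dif_pos hR]

lemma dpI_corner {matrix : List (List Int)} {h w y x : Int} (hD : ¬ y + 1 < h) (hR : ¬ x + 1 < w) :
    dpI matrix h w y x
      = max (1 - PySem.List.pyGetD (PySem.List.pyGetD matrix y []) x 0) 1 := by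
  rw [dpI.eq_def, dif_neg (fun hc => hD hc.1), dif_neg hD, dif_neg hR]

-- ---- B side: the stack machine computes dpI ----

def pvCells (l : List (Int × Int × Bool)) : List (Int × Int) := l.map (fun e => (e.1, e.2.1))

def pvAvail (memo : PySem.Dict (Int × Int) Int) (pre : List (Int × Int × Bool)) (c : Int × Int) : Prop :=
  memo.contains c = true ∨ c ∈ pvCells pre

def pvMemoOK (matrix : List (List Int)) (h w : Int) (memo : PySem.Dict (Int × Int) Int) : Prop :=
  ∀ c v, memo.get? c = some v →
    (0 ≤ c.1 ∧ c.1 < h ∧ 0 ≤ c.2 ∧ c.2 < w) ∧ v = dpI matrix h w c.1 c.2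

def pvStackOK (h w : Int) (memo : PySem.Dict (Int × Int) Int) (stack : List (Int × Int × Bool)) : Prop :=
  ∀ pre y x post, stack = pre ++ (y, x, true) :: post →
    (y + 1 < h → pvAvail memo pre (y + 1, x)) ∧ (x + 1 < w → pvAvail memo pre (y, x + 1))

def pvGridOK (h w : Int) (stack : List (Int × Int × Bool)) : Prop :=
  ∀ e ∈ stack, 0 ≤ e.1 ∧ e.1 < h ∧ 0 ≤ e.2.1 ∧ e.2.1 < w

lemma pvAvail_weaken {memo : PySem.Dict (Int × Int) Int} {pre pre' : List (Int × Int × Bool)}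
    {c : Int × Int} (hsub : ∀ d, d ∈ pvCells pre → d ∈ pvCells pre') :
    pvAvail memo pre c → pvAvail memo pre' c := by
  rintro (h | h)
  · exact Or.inl h
  · exact Or.inr (hsub c h)

lemma pvAvail_pop {memo : PySem.Dict (Int × Int) Int} {y x : Int} {r : Bool}
    {pre : List (Int × Int × Bool)} {c : Int × Int}
    (hc : memo.contains (y, x) = true) :
    pvAvail memo ((y, x, r) :: pre) c → pvAvail memo pre c := by
  rintro (h | h)
  · exact Or.inl h
  · simp only [pvCells, List.map_cons, List.mem_cons] at h
    rcases h with h | h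
    · exact Or.inl (h ▸ hc)
    · exact Or.inr h

lemma pvAvail_pop_insert {memo : PySem.Dict (Int × Int) Int} {y x : Int} {v : Int} {r : Bool}
    {pre : List (Int × Int × Bool)} {c : Int × Int} :
    pvAvail memo ((y, x, r) :: pre) c → pvAvail (memo.insert (y, x) v) pre c := by
  rintro (h | h)
  · refine Or.inl ?_
    rw [PySem.Dict.contains_insert]
    simp [h]
  · simp only [pvCells, List.map_cons, List.mem_cons] at h
    rcases h with h | h
    · exact Or.inl (by rw [h]; exact PySem.Dict.contains_insert_self _ _ _)
    · exact Or.inr h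

-- splitting 'pushes ++ exit :: rest' at an exit entry, when pushes has no exits
lemma pvSplit {P rest pre post : List (Int × Int × Bool)} {y0 x0 y x : Int}
    (hP : ∀ e ∈ P, e.2.2 = false)
    (heq : P ++ (y0, x0, true) :: rest = pre ++ (y, x, true) :: post) :
    (pre = P ∧ y = y0 ∧ x = x0 ∧ post = rest) ∨
    (∃ pre', pre = P ++ (y0, x0, true) :: pre' ∧ rest = pre' ++ (y, x, true) :: post) := by
  rcases List.append_eq_append_iff.mp heq with ⟨a', ha1, ha2⟩ | ⟨c', hc1, hc2⟩
  · cases a' with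
    | nil =>
        simp only [List.nil_append] at ha2
        obtain ⟨he, hrest⟩ := List.cons_eq_cons.mp ha2
        simp only [Prod.mk.injEq] at he
        exact Or.inl ⟨by simpa using ha1, he.1.symm, he.2.1.symm, hrest.symm⟩
    | cons e a'' =>
        obtain ⟨he, hrest⟩ := List.cons_eq_cons.mp ha2
        exact Or.inr ⟨a'', by rw [ha1, he], hrest⟩
  · cases c' with
    | nil =>
        simp only [List.append_nil] at hc1
        simp only [List.nil_append] at hc2
        obtain ⟨he, hrest⟩ := List.cons_eq_cons.mp hc2
        simp only [Prod.mk.injEq] at he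
        exact Or.inl ⟨hc1.symm, he.1, he.2.1, hrest⟩
    | cons e c'' =>
        exfalso
        obtain ⟨he, -⟩ := List.cons_eq_cons.mp hc2
        have hmem : e ∈ P := by rw [hc1]; exact List.mem_append_right _ List.mem_cons_self
        have := hP e hmem
        rw [← he] at this
        simp at this

lemma contains_get? {memo : PySem.Dict (Int × Int) Int} {c : Int × Int}
    (h : memo.contains c = true) : ∃ v, memo.get? c = some v := by
  rw [PySem.Dict.contains_eq_isSome_get?] at h
  cases hg : memo.get? c with
  | none => rw [hg] at h; simp at h
  | some v => exact ⟨v, rfl⟩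

lemma bLoop_inv (matrix : List (List Int)) (h w : Int) (stack : List (Int × Int × Bool))
    (memo : PySem.Dict (Int × Int) Int) :
    pvMemoOK matrix h w memo → pvStackOK h w memo stack → pvGridOK h w stack →
    (memo.contains (0, 0) = true ∨ ((0 : Int), (0 : Int)) ∈ pvCells stack) →
    pvMemoOK matrix h w (bLoop matrix h w stack memo) ∧
      (bLoop matrix h w stack memo).contains (0, 0) = true := by
  fun_induction bLoop matrix h w stack memo with
  | case1 memo =>
      intro hm _ _ hr
      refine ⟨hm, ?_⟩
      rcases hr with hr | hr
      · exact hr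
      · simp [pvCells] at hr
  | case2 memo y x ready rest hcon ih =>
      intro hm hs hg hr
      apply ih hm
      · intro pre y' x' post heq
        have hold := hs ((y, x, ready) :: pre) y' x' post (by rw [heq]; rfl)
        exact ⟨fun hh => pvAvail_pop hcon (hold.1 hh), fun hh => pvAvail_pop hcon (hold.2 hh)⟩
      · exact fun e he => hg e (List.mem_cons_of_mem _ he)
      · rcases hr with hr | hr
        · exact Or.inl hr
        · simp only [pvCells, List.map_cons, List.mem_cons] at hr
          rcases hr with hr | hr
          · exact Or.inl (by rw [hr]; exact hcon)
          · exact Or.inr hr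
  | case3 memo y x rest hcon ih =>
      intro hm hs hg hr
      simp only [dite_eq_ite] at ih ⊢
      have hgy : 0 ≤ y ∧ y < h ∧ 0 ≤ x ∧ x < w := hg (y, x, true) List.mem_cons_self
      have hsplit := hs [] y x rest rfl
      have hdown : y + 1 < h → memo.getD (y + 1, x) 0 = dpI matrix h w (y + 1) x := by
        intro hh
        rcases hsplit.1 hh with hc | hc
        · obtain ⟨v, hv⟩ := contains_get? hc
          rw [PySem.Dict.getD_eq_get?_getD, hv, Option.getD_some]
          exact (hm _ _ hv).2
        · simp [pvCells] at hc
      have hright : x + 1 < w → memo.getD (y, x + 1) 0 = dpI matrix h w y (x + 1) := by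
        intro hh
        rcases hsplit.2 hh with hc | hc
        · obtain ⟨v, hv⟩ := contains_get? hc
          rw [PySem.Dict.getD_eq_get?_getD, hv, Option.getD_some]
          exact (hm _ _ hv).2
        · simp [pvCells] at hc
      have hval : max ((if y + 1 < h ∧ x + 1 < w then
              min (memo.getD (y + 1, x) 0) (memo.getD (y, x + 1) 0)
            else if y + 1 < h then memo.getD (y + 1, x) 0
            else if x + 1 < w then memo.getD (y, x + 1) 0
            else 1) - PySem.List.pyGetD (PySem.List.pyGetD matrix y []) x 0) 1
          = dpI matrix h w y x := by
        split_ifs with h1 h2 h3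
        · rw [dpI_interior h1.1 h1.2, hdown h1.1, hright h1.2]
        · rw [dpI_down h2 (fun hc => h1 ⟨h2, hc⟩), hdown h2]
        · rw [dpI_right h2 h3, hright h3]
        · rw [dpI_corner h2 h3]
      apply ih
      · intro c v hv
        rw [PySem.Dict.get?_insert] at hv
        by_cases hcy : c = (y, x)
        · subst hcy
          rw [if_pos rfl] at hv
          have hv2 := Option.some.inj hv
          subst hv2
          exact ⟨⟨hgy.1, hgy.2.1, hgy.2.2.1, hgy.2.2.2⟩, hval⟩
        · rw [if_neg hcy] at hv
          exact hm c v hv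
      · intro pre y' x' post heq
        have hold := hs ((y, x, true) :: pre) y' x' post (by rw [heq]; rfl)
        exact ⟨fun hh => pvAvail_pop_insert (hold.1 hh), fun hh => pvAvail_pop_insert (hold.2 hh)⟩
      · exact fun e he => hg e (List.mem_cons_of_mem _ he)
      · rcases hr with hr | hr
        · refine Or.inl ?_
          rw [PySem.Dict.contains_insert]
          simp [hr]
        · simp only [pvCells, List.map_cons, List.mem_cons] at hr
          rcases hr with hr | hr
          · exact Or.inl (by rw [hr]; exact PySem.Dict.contains_insert_self _ _ _)
          · exact Or.inr hr
  | case4 memo y x ready rest hcon hready ih =>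
      intro hm hs hg hr
      have hgy : 0 ≤ y ∧ y < h ∧ 0 ≤ x ∧ x < w := hg (y, x, ready) List.mem_cons_self
      have hPfalse : ∀ e ∈ ((if x + 1 < w ∧ ¬ memo.contains (y, x + 1) = true
              then [(y, x + 1, false)] else [])
            ++ (if y + 1 < h ∧ ¬ memo.contains (y + 1, x) = true
              then [(y + 1, x, false)] else [])), e.2.2 = false := by
        intro e he
        rcases List.mem_append.mp he with hc | hc <;> split_ifs at hc <;> simp at hc <;> rw [hc]
      apply ih hm
      · intro pre y' x' post heq
        simp only [dite_eq_ite] at heq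
        rcases pvSplit hPfalse heq with ⟨hpre, hy, hx, hpost⟩ | ⟨pre', hpre, hrest⟩
        · rw [hy, hx]
          constructor <;> intro hh
          · by_cases hcd : memo.contains (y + 1, x) = true
            · exact Or.inl hcd
            · refine Or.inr ?_
              rw [hpre]
              simp only [pvCells, List.map_append, List.mem_append]
              refine Or.inr ?_
              rw [if_pos ⟨hh, by simp [hcd]⟩]
              simp
          · by_cases hcd : memo.contains (y, x + 1) = true
            · exact Or.inl hcd
            · refine Or.inr ?_
              rw [hpre]
              simp only [pvCells, List.map_append, List.mem_append]
              refine Or.inl ?_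
              rw [if_pos ⟨hh, by simp [hcd]⟩]
              simp
        · have hold := hs ((y, x, ready) :: pre') y' x' post (by rw [hrest]; rfl)
          have hsub : ∀ d, d ∈ pvCells ((y, x, ready) :: pre') → d ∈ pvCells pre := by
            intro d hd
            rw [hpre]
            simp only [pvCells, List.map_cons, List.mem_cons, List.map_append,
              List.mem_append] at hd ⊢
            rcases hd with hd | hd
            · exact Or.inr (Or.inl hd)
            · exact Or.inr (Or.inr hd)
          exact ⟨fun hh => pvAvail_weaken hsub (hold.1 hh),
            fun hh => pvAvail_weaken hsub (hold.2 hh)⟩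
      · intro e he
        simp only [dite_eq_ite] at he
        rcases List.mem_append.mp he with he1 | he1
        · rcases List.mem_append.mp he1 with he2 | he2
          · split_ifs at he2 with hc
            · simp only [List.mem_singleton] at he2
              subst he2
              exact ⟨hgy.1, hgy.2.1, (by omega : (0 : Int) ≤ x + 1), hc.1⟩
            · simp at he2
          · split_ifs at he2 with hc
            · simp only [List.mem_singleton] at he2
              subst he2
              exact ⟨(by omega : (0 : Int) ≤ y + 1), hc.1, hgy.2.2.1, hgy.2.2.2⟩
            · simp at he2
        · rcases List.mem_cons.mp he1 with he2 | he2
          · subst he2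
            exact ⟨hgy.1, hgy.2.1, hgy.2.2.1, hgy.2.2.2⟩
          · exact hg e (List.mem_cons_of_mem _ he2)
      · rcases hr with hr | hr
        · exact Or.inl hr
        · refine Or.inr ?_
          have hmem : ((0 : Int), (0 : Int)) ∈ pvCells ((y, x, true) :: rest) := by
            simp only [pvCells, List.map_cons, List.mem_cons] at hr ⊢
            exact hr
          simp only [pvCells, List.map_append]
          exact List.mem_append_right _ hmem

lemma alt_eq_dpI (matrix : List (List Int)) (hpre : Pre_initialVal matrix) :
    initialVal_alt matrix
      = dpI matrix (matrix.length : Int) ((PySem.List.pyGetD matrix 0 []).length : Int) 0 0 := by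
  obtain ⟨hne, hw1, hrows⟩ := hpre
  have hh : (0 : Int) < (matrix.length : Int) := by
    have := List.length_pos_iff.mpr hne
    exact_mod_cast this
  have hw : (0 : Int) < ((PySem.List.pyGetD matrix 0 []).length : Int) := by
    have h0 : PySem.List.pyGetD matrix 0 [] = matrix.headI := by
      cases matrix with
      | nil => exact absurd rfl hne
      | cons r rest => simp [PySem.List.pyGetD_zero_cons]
    rw [h0]
    exact_mod_cast lt_of_lt_of_le Nat.zero_lt_one hw1
  have hinv := bLoop_inv matrix (matrix.length : Int) ((PySem.List.pyGetD matrix 0 []).length : Int)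
      [(0, 0, false)] PySem.Dict.empty
    (by intro c v hv; rw [PySem.Dict.get?_empty] at hv; cases hv)
    (by
      intro pre y x post heq
      exfalso
      cases pre with
      | nil => simp at heq
      | cons e p => simp at heq)
    (by
      intro e he
      simp only [List.mem_singleton] at he
      subst he
      exact ⟨le_refl _, hh, le_refl _, hw⟩)
    (Or.inr (by simp [pvCells]))
  obtain ⟨hmOK, hc⟩ := hinv
  rw [PySem.Dict.contains_eq_isSome_get?] at hc
  cases hget : (bLoop matrix (matrix.length : Int) ((PySem.List.pyGetD matrix 0 []).length : Int)
      [(0, 0, false)] PySem.Dict.empty).get? (0, 0) with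
  | none => rw [hget] at hc; simp at hc
  | some v =>
      simp only [initialVal_alt]
      rw [PySem.Dict.getD_eq_get?_getD, hget, Option.getD_some]
      exact (hmOK _ _ hget).2

-- ---- A side: the table fill computes dpI (machinery from the row-list characterisation) ----

-- the reversed dp row of one matrix row, given the reversed dp row below (if any)
def bScanBase (acc : Int) : List Int → List Int
  | [] => []
  | v :: vs => let a := max (acc - v) 1; a :: bScanBase a vs

def bScanComb (acc : Int) : List (Int × Int) → List Int
  | [] => []
  | (v, b) :: ps => let a := max (min b acc - v) 1; a :: bScanComb a ps

def bStep (w : Nat) (dpRev? : Option (List Int)) (row : List Int) : Option (List Int) :=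
  let rev := (row.take w).reverse
  match dpRev? with
  | none =>
      let a0 := max (1 - PySem.List.pyGetD rev 0 0) 1
      some (a0 :: bScanBase a0 (rev.drop 1))
  | some prev =>
      let a0 := max (PySem.List.pyGetD prev 0 0 - PySem.List.pyGetD rev 0 0) 1
      some (a0 :: bScanComb a0 ((rev.drop 1).zip (prev.drop 1)))

def rdpRow (w : Nat) (below? : Option (List Int)) (row : List Int) : List Int :=
  (bStep w below? row).getD []

-- the reversed dp rows for a (suffix of the) matrix, top row first
def rdpRows (w : Nat) : List (List Int) → List (List Int)
  | [] => []
  | r :: rest => rdpRow w (rdpRows w rest).head? r :: rdpRows w rest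

lemma bScanBase_length (a : Int) (l : List Int) : (bScanBase a l).length = l.length := by
  induction l generalizing a with
  | nil => rfl
  | cons v vs ih => simp [bScanBase, ih]

lemma bScanComb_length (a : Int) (l : List (Int × Int)) : (bScanComb a l).length = l.length := by
  induction l generalizing a with
  | nil => rfl
  | cons p ps ih => obtain ⟨v, b⟩ := p; simp [bScanComb, ih]

lemma rdpRow_length (w : Nat) (below? : Option (List Int)) (row : List Int)
    (hW : 1 ≤ w) (hrow : w ≤ row.length)
    (hp : ∀ prev, below? = some prev → prev.length = w) :
    (rdpRow w below? row).length = w := by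
  cases below? with
  | none =>
      simp [rdpRow, bStep, bScanBase_length]
      omega
  | some prev =>
      have := hp prev rfl
      simp [rdpRow, bStep, bScanComb_length]
      omega

lemma rdpRows_length (w : Nat) (hW : 1 ≤ w) (rows : List (List Int))
    (hrows : ∀ r ∈ rows, w ≤ r.length) :
    ∀ l ∈ rdpRows w rows, l.length = w := by
  induction rows with
  | nil => intro l hl; simp [rdpRows] at hl
  | cons r rest ih =>
      intro l hl
      simp [rdpRows] at hl
      rcases hl with h | h
      · subst h
        apply rdpRow_length _ _ _ hW (hrows r (by simp))
        intro prev hprev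
        cases hrest : rdpRows w rest with
        | nil => simp [hrest] at hprev
        | cons a as =>
            simp [hrest] at hprev
            exact hprev ▸ ih (fun r hr => hrows r (List.mem_cons_of_mem _ hr)) a (hrest ▸ List.mem_cons_self)
      · exact ih (fun r hr => hrows r (List.mem_cons_of_mem _ hr)) l h

-- generic: element i of a prefix-fold
lemma foldl_take_succ {α β : Type} (f : β → α → β) (a : β) (l : List α) (i : Nat)
    (h : i < l.length) :
    (l.take (i + 1)).foldl f a = f ((l.take i).foldl f a) l[i] := by
  induction l generalizing a i with
  | nil => simp at h
  | cons x xs ih =>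
      cases i with
      | zero => simp
      | succ j => simpa using ih (f a x) j (by simpa using h)

lemma bScanBase_eq_map (l : List Int) : ∀ a : Int,
    bScanBase a l = (List.range l.length).map
      (fun i => ((l.take (i + 1)).foldl (fun acc v => max (acc - v) 1) a)) := by
  induction l with
  | nil => intro a; rfl
  | cons v vs ih =>
      intro a
      simp only [bScanBase, List.length_cons, List.range_succ_eq_map, List.map_cons, List.map_map]
      refine congrArg₂ _ (by simp) ?_
      rw [ih]
      refine (List.map_congr_left fun i _ => ?_).symm
      simp [List.take_succ_cons]

lemma bScanComb_eq_map (l : List (Int × Int)) : ∀ a : Int,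
    bScanComb a l = (List.range l.length).map
      (fun i => ((l.take (i + 1)).foldl (fun acc p => max (min p.2 acc - p.1) 1) a)) := by
  induction l with
  | nil => intro a; rfl
  | cons p ps ih =>
      intro a
      obtain ⟨v, b⟩ := p
      simp only [bScanComb, List.length_cons, List.range_succ_eq_map, List.map_cons, List.map_map]
      refine congrArg₂ _ (by simp) ?_
      rw [ih]
      refine (List.map_congr_left fun i _ => ?_).symm
      simp [List.take_succ_cons]

-- getD of the reversed truncated row
lemma rev_getD (w : Nat) (row : List Int) (i : Nat) (hw : w ≤ row.length) (hi : i < w) :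
    ((row.take w).reverse).getD i 0 = row.getD (w - 1 - i) 0 := by
  have hlen : (row.take w).length = w := by simp [hw]
  rw [List.getD_eq_getElem _ _ (by simp [hlen, hi]),
    List.getD_eq_getElem _ _ (by omega : w - 1 - i < row.length)]
  rw [List.getElem_reverse]
  simp only [List.getElem_take, hlen]

lemma rdpRow_getD_none (w : Nat) (row : List Int) (i : Nat) (hi : i < w) (hw : w ≤ row.length) :
    (rdpRow w none row).getD i 0 =
      (((row.take w).reverse.drop 1).take i).foldl (fun acc v => max (acc - v) 1)
        (max (1 - PySem.List.pyGetD ((row.take w).reverse) 0 0) 1) := by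
  cases i with
  | zero => simp [rdpRow, bStep]
  | succ i =>
      have hlen : ((row.take w).reverse.drop 1).length = w - 1 := by simp [hw]
      simp only [rdpRow, bStep, Option.getD_some, List.getD_cons_succ]
      rw [bScanBase_eq_map]
      rw [List.getD_eq_getElem _ _ (by simp [hlen]; omega)]
      rw [List.getElem_map]
      congr 1
      simp

lemma rdpRow_getD_some (w : Nat) (prev row : List Int) (i : Nat) (hi : i < w)
    (hw : w ≤ row.length) (hp : prev.length = w) :
    (rdpRow w (some prev) row).getD i 0 =
      ((((row.take w).reverse.drop 1).zip (prev.drop 1)).take i).foldl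
        (fun acc p => max (min p.2 acc - p.1) 1)
        (max (PySem.List.pyGetD prev 0 0 - PySem.List.pyGetD ((row.take w).reverse) 0 0) 1) := by
  cases i with
  | zero => simp [rdpRow, bStep]
  | succ i =>
      have hlen : (((row.take w).reverse.drop 1).zip (prev.drop 1)).length = w - 1 := by
        simp [hw, hp]
      simp only [rdpRow, bStep, Option.getD_some, List.getD_cons_succ]
      rw [bScanComb_eq_map]
      rw [List.getD_eq_getElem _ _ (by simp [hlen]; omega)]
      rw [List.getElem_map]
      congr 1
      simp

-- the recurrences
lemma rdpRow_none_zero (w : Nat) (row : List Int) :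
    (rdpRow w none row).getD 0 0 = max (1 - PySem.List.pyGetD ((row.take w).reverse) 0 0) 1 := by
  simp [rdpRow, bStep]

lemma rdpRow_some_zero (w : Nat) (prev row : List Int) :
    (rdpRow w (some prev) row).getD 0 0 =
      max (PySem.List.pyGetD prev 0 0 - PySem.List.pyGetD ((row.take w).reverse) 0 0) 1 := by
  simp [rdpRow, bStep]

lemma rdpRow_none_succ (w : Nat) (row : List Int) (i : Nat) (hi : i + 1 < w)
    (hw : w ≤ row.length) :
    (rdpRow w none row).getD (i + 1) 0 =
      max ((rdpRow w none row).getD i 0 - ((row.take w).reverse).getD (i + 1) 0) 1 := by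
  rw [rdpRow_getD_none w row (i+1) hi hw, rdpRow_getD_none w row i (by omega) hw]
  have hlen : ((row.take w).reverse.drop 1).length = w - 1 := by simp [hw]
  rw [foldl_take_succ _ _ _ i (by omega)]
  have h1 : ((row.take w).reverse.drop 1)[i]'(by simp [hw]; omega)
      = ((row.take w).reverse).getD (i + 1) 0 := by
    rw [List.getElem_drop, List.getD_eq_getElem _ _ (by simp [hw]; omega)]
    have h : 1 + i = i + 1 := by omega
    simp [h]
  rw [h1]

lemma rdpRow_some_succ (w : Nat) (prev row : List Int) (i : Nat) (hi : i + 1 < w)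
    (hw : w ≤ row.length) (hp : prev.length = w) :
    (rdpRow w (some prev) row).getD (i + 1) 0 =
      max (min (prev.getD (i + 1) 0) ((rdpRow w (some prev) row).getD i 0)
            - ((row.take w).reverse).getD (i + 1) 0) 1 := by
  have hzlen : (((row.take w).reverse.drop 1).zip (prev.drop 1)).length = w - 1 := by
    simp [hw, hp]
  rw [rdpRow_getD_some w prev row (i+1) hi hw hp, rdpRow_getD_some w prev row i (by omega) hw hp]
  rw [foldl_take_succ _ _ _ i (by rw [hzlen]; omega)]
  have h1 : ((row.take w).reverse.drop 1)[i]'(by simp [hw]; omega)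
      = ((row.take w).reverse).getD (i + 1) 0 := by
    rw [List.getElem_drop, List.getD_eq_getElem _ _ (by simp [hw]; omega)]
    have h : 1 + i = i + 1 := by omega
    simp [h]
  have h2 : (prev.drop 1)[i]'(by simp [hp]; omega) = prev.getD (i + 1) 0 := by
    rw [List.getElem_drop, List.getD_eq_getElem _ _ (by omega)]
    have h : 1 + i = i + 1 := by omega
    simp [h]
  rw [List.getElem_zip]
  simp only [h1, h2]

lemma getD_set_self (l : List (List Int)) (n : Nat) (v : List Int) (h : n < l.length) :
    (l.set n v).getD n [] = v := by
  simp [List.getD_eq_getElem?_getD, List.getElem?_set_self h]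

lemma getD_set_ne (l : List (List Int)) (n m : Nat) (v : List Int) (h : n ≠ m) :
    (l.set n v).getD m [] = l.getD m [] := by
  simp [List.getD_eq_getElem?_getD, List.getElem?_set_ne h]

lemma getD_reverse (l : List Int) (k : Nat) (hk : k < l.length) :
    l.reverse.getD k 0 = l.getD (l.length - 1 - k) 0 := by
  simpa using rev_getD l.length l k (le_refl _) hk

lemma take_rev_getD_zero (R : List Int) (m : Nat) (h1 : 1 ≤ m) (h2 : m ≤ R.length) :
    ((R.take m).reverse).getD 0 0 = R.getD (m - 1) 0 := by
  simpa using rev_getD m R 0 h2 (by omega)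

lemma take_succ_reverse (R : List Int) (m : Nat) (h : m < R.length) :
    (R.take (m + 1)).reverse = R.getD m 0 :: (R.take m).reverse := by
  rw [List.take_add_one, List.getElem?_eq_getElem h]
  simp [List.getD_eq_getElem?_getD, List.getElem?_eq_getElem h]

lemma rdpRows_length_list (w : Nat) (rows : List (List Int)) :
    (rdpRows w rows).length = rows.length := by
  induction rows with
  | nil => rfl
  | cons r rest ih => simp [rdpRows, ih]

lemma rdpRows_head?_none (w : Nat) (rows : List (List Int)) :
    (rdpRows w rows).head? = none ↔ rows = [] := by
  cases rows <;> simp [rdpRows]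

lemma row_assemble (pre suffix' R : List Int) (k W : Nat) (hpre : pre.length = k + 1)
    (hk : k + 1 ≤ W) (hR : R.length = W) (v : Int) (hv : v = R.getD (W - k - 1) 0)
    (hsuf : suffix' = (R.take (W - (k + 1))).reverse) :
    (pre ++ suffix').set k v = pre.take k ++ (R.take (W - k)).reverse := by
  rw [List.set_append_left _ _ (by omega)]
  have hset : pre.set k v = pre.take k ++ [v] := by
    rw [List.set_eq_take_append_cons_drop, if_pos (by omega)]
    have : pre.drop (k + 1) = [] := by
      apply List.drop_eq_nil_of_le; omega
    rw [this]
  rw [hset, hsuf, hv, List.append_assoc]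
  congr 1
  have h2 : W - k = (W - k - 1) + 1 := by omega
  rw [h2, take_succ_reverse R _ (by omega)]
  rfl

lemma inner_go (matrix : List (List Int)) (W H : Nat) (hW : 1 ≤ W)
    (hH : matrix.length = H) (t : Nat) (ht : t < H)
    (below? : Option (List Int))
    (hbm : below? = none ↔ t + 1 = H)
    (hplen : ∀ prev, below? = some prev → prev.length = W)
    (hrow : W ≤ (matrix.getD t []).length) :
    ∀ (k : Nat), k ≤ W → ∀ (dpA : List (List Int)), dpA.length = H →
      (∀ prev, below? = some prev → dpA.getD (t + 1) [] = prev.reverse) →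
      ∀ (pre : List Int), pre.length = k →
      dpA.getD t [] = pre ++ ((rdpRow W below? (matrix.getD t [])).take (W - k)).reverse →
      (PySem.List.pyRange ((k : Int) - 1) (-1) (-1)).foldl
          (aStep matrix ((H : Int) - 1) ((W : Int) - 1) (t : Int)) dpA
        = dpA.set t (rdpRow W below? (matrix.getD t [])).reverse := by
  intro k
  induction k with
  | zero =>
      intro _ dpA hlen hb pre hpre hrowt
      rw [show ((0 : Nat) : Int) - 1 = -1 by norm_num,
        PySem.List.pyRange_neg_one_eq_nil (by omega)]
      simp only [List.foldl_nil]
      have hR : (rdpRow W below? (matrix.getD t [])).length = W :=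
        rdpRow_length _ _ _ hW hrow hplen
      have hpre0 : pre = [] := List.eq_nil_of_length_eq_zero hpre
      have hval : dpA.getD t [] = (rdpRow W below? (matrix.getD t [])).reverse := by
        rw [hrowt, hpre0, List.nil_append, Nat.sub_zero, List.take_of_length_le (le_of_eq hR)]
      have htlen : t < dpA.length := by omega
      rw [List.getD_eq_getElem _ _ htlen] at hval
      rw [← hval, List.set_getElem_self]
  | succ k ih =>
      intro hk dpA hlen hb pre hpre hrowt
      have hR : (rdpRow W below? (matrix.getD t [])).length = W :=
        rdpRow_length _ _ _ hW hrow hplen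
      have hrange : PySem.List.pyRange (((k + 1 : Nat) : Int) - 1) (-1) (-1)
          = (k : Int) :: PySem.List.pyRange ((k : Int) - 1) (-1) (-1) := by
        have h1 : (((k + 1 : Nat) : Int) - 1) = (k : Int) := by push_cast; ring
        rw [h1, PySem.List.pyRange_neg_one_cons (by omega)]
      rw [hrange, List.foldl_cons]
      have hx : (((k : Int) = (W : Int) - 1)) ↔ k = W - 1 := by omega
      have hy : (((t : Int) = (H : Int) - 1)) ↔ t + 1 = H := by omega
      have hm : PySem.List.pyGetD (PySem.List.pyGetD matrix (t : Int) []) (k : Int) 0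
          = (matrix.getD t []).getD k 0 := by simp
      have hright : k + 1 < W →
          PySem.List.pyGetD (PySem.List.pyGetD dpA (t : Int) []) ((k : Int) + 1) 0
            = (rdpRow W below? (matrix.getD t [])).getD (W - k - 2) 0 := by
        intro hkW
        have h1 : ((k : Int) + 1) = ((k + 1 : Nat) : Int) := by push_cast; ring
        rw [h1]
        simp only [PySem.List.pyGetD_natCast]
        rw [hrowt]
        rw [List.getD_eq_getElem?_getD, List.getElem?_append_right (by omega), hpre]
        simp only [Nat.sub_self]
        rw [← List.getD_eq_getElem?_getD]
        rw [take_rev_getD_zero _ (W - (k + 1)) (by omega) (by omega)]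
        congr 1
      have hbel : ∀ prev, below? = some prev →
          PySem.List.pyGetD (PySem.List.pyGetD dpA ((t : Int) + 1) []) (k : Int) 0
            = prev.getD (W - 1 - k) 0 := by
        intro prev hp
        have h1 : ((t : Int) + 1) = ((t + 1 : Nat) : Int) := by push_cast; ring
        rw [h1]
        simp only [PySem.List.pyGetD_natCast]
        rw [hb prev hp]
        rw [getD_reverse prev k (by rw [hplen prev hp]; omega), hplen prev hp]
      have hrevk : ((matrix.getD t []).take W).reverse.getD (W - 1 - k) 0
          = (matrix.getD t []).getD k 0 := by
        rw [rev_getD W _ (W - 1 - k) hrow (by omega)]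
        congr 1
        omega
      have hset : ∀ v : Int, aSet dpA (t : Int) (k : Int) v
          = dpA.set t ((dpA.getD t []).set k v) := by
        intro v; simp [aSet]
      have hstep : aStep matrix ((H : Int) - 1) ((W : Int) - 1) (t : Int) dpA (k : Int)
          = dpA.set t (pre.take k
              ++ ((rdpRow W below? (matrix.getD t [])).take (W - k)).reverse) := by
        simp only [aStep]
        by_cases hkW : k = W - 1
        · cases hbl : below? with
          | none =>
              subst hbl
              have htH : t + 1 = H := hbm.mp rfl
              rw [if_pos ⟨hx.mpr hkW, hy.mpr htH⟩, hset, hm, hrowt]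
              congr 1
              refine row_assemble pre _ _ k W hpre (by omega) hR _ ?_ rfl
              have h01 : W - 1 - k = 0 := by omega
              rw [h01] at hrevk
              rw [show W - k - 1 = 0 by omega, rdpRow_none_zero, PySem.List.pyGetD_zero, hrevk]
          | some prev =>
              subst hbl
              have hyneg : ¬ ((t : Int) = (H : Int) - 1) := by
                intro h
                exact Option.some_ne_none prev (hbm.mpr (hy.mp h))
              rw [if_neg (fun hc => hyneg hc.2), if_pos (hx.mpr hkW),
                hbel prev rfl, hset, hm, hrowt]
              congr 1
              refine row_assemble pre _ _ k W hpre (by omega) hR _ ?_ rfl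
              have h01 : W - 1 - k = 0 := by omega
              rw [h01] at hrevk
              rw [show W - k - 1 = 0 by omega, rdpRow_some_zero, PySem.List.pyGetD_zero,
                PySem.List.pyGetD_zero, hrevk, h01]
        · have hxneg : ¬ ((k : Int) = (W : Int) - 1) := fun h => hkW (hx.mp h)
          have hk2 : k + 1 < W := by omega
          cases hbl : below? with
          | none =>
              subst hbl
              have htH : t + 1 = H := hbm.mp rfl
              rw [if_neg (fun hc => hxneg hc.1), if_neg hxneg,
                if_pos (hy.mpr htH), hright hk2, hset, hm, hrowt]
              congr 1
              refine row_assemble pre _ _ k W hpre (by omega) hR _ ?_ rfl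
              rw [show W - k - 1 = (W - k - 2) + 1 by omega,
                rdpRow_none_succ W _ (W - k - 2) (by omega) hrow,
                show W - k - 2 + 1 = W - 1 - k by omega, hrevk]
          | some prev =>
              subst hbl
              have hyneg : ¬ ((t : Int) = (H : Int) - 1) := by
                intro h
                exact Option.some_ne_none prev (hbm.mpr (hy.mp h))
              rw [if_neg (fun hc => hxneg hc.1), if_neg hxneg, if_neg hyneg,
                hbel prev rfl, hright hk2, hset, hm, hrowt]
              congr 1
              refine row_assemble pre _ _ k W hpre (by omega) hR _ ?_ rfl
              rw [show W - k - 1 = (W - k - 2) + 1 by omega,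
                rdpRow_some_succ W prev _ (W - k - 2) (by omega) hrow (hplen prev rfl),
                show W - k - 2 + 1 = W - 1 - k by omega, hrevk]
      rw [hstep]
      rw [ih (by omega)
        (dpA.set t (pre.take k
          ++ ((rdpRow W below? (matrix.getD t [])).take (W - k)).reverse))
        (by simp [hlen])
        (fun prev hp => by rw [getD_set_ne _ _ _ _ (by omega)]; exact hb prev hp)
        (pre.take k) (by simp [hpre])
        (getD_set_self _ _ _ (by omega))]
      rw [List.set_set]

lemma outer_go (matrix : List (List Int)) (W H : Nat) (hW : 1 ≤ W)
    (hH : matrix.length = H) (hrows : ∀ r ∈ matrix, W ≤ r.length) :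
    ∀ (n t : Nat), t + n = H →
    (PySem.List.pyRange ((H : Int) - 1) ((t : Int) - 1) (-1)).foldl
        (fun dp y => (PySem.List.pyRange ((W : Int) - 1) (-1) (-1)).foldl
          (aStep matrix ((H : Int) - 1) ((W : Int) - 1) y) dp)
        (List.replicate H (List.replicate W (0 : Int)))
      = List.replicate t (List.replicate W (0 : Int))
          ++ (rdpRows W (matrix.drop t)).map List.reverse := by
  intro n
  induction n with
  | zero =>
      intro t ht
      have htH : t = H := by omega
      rw [show PySem.List.pyRange ((H : Int) - 1) ((t : Int) - 1) (-1) = [] from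
        PySem.List.pyRange_neg_one_eq_nil (by omega)]
      simp only [List.foldl_nil]
      have hdrop : matrix.drop t = [] := List.drop_eq_nil_of_le (by omega)
      rw [hdrop, htH]
      simp [rdpRows]
  | succ n ihn =>
      intro t ht
      have ht1 : t + 1 + n = H := by omega
      have htH : t < H := by omega
      have hsplit : PySem.List.pyRange ((H : Int) - 1) ((t : Int) - 1) (-1)
          = PySem.List.pyRange ((H : Int) - 1) (((t + 1 : Nat) : Int) - 1) (-1) ++ [(t : Int)] := by
        rw [PySem.List.pyRange_neg_one_eq_reverse, PySem.List.pyRange_neg_one_eq_reverse]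
        have e1 : ((t : Int) - 1) + 1 = (t : Int) := by ring
        have e2 : ((H : Int) - 1) + 1 = (H : Int) := by ring
        have e3 : ((((t + 1 : Nat) : Int)) - 1) + 1 = (t : Int) + 1 := by push_cast; ring
        rw [e1, e2, e3, PySem.List.pyRange_one_cons (by omega)]
        simp
      rw [hsplit, List.foldl_append, ihn (t + 1) ht1]
      simp only [List.foldl_cons, List.foldl_nil]
      have hmemt : matrix.getD t [] ∈ matrix := by
        rw [List.getD_eq_getElem _ _ (by omega)]
        exact List.getElem_mem _
      have hdl : (matrix.drop (t + 1)).length = H - (t + 1) := by simp [hH]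
      have hbm : (rdpRows W (matrix.drop (t + 1))).head? = none ↔ t + 1 = H := by
        rw [rdpRows_head?_none, ← List.length_eq_zero_iff, hdl]
        omega
      have hplen : ∀ prev, (rdpRows W (matrix.drop (t + 1))).head? = some prev →
          prev.length = W := by
        intro prev hp
        exact rdpRows_length W hW _ (fun r hr => hrows r (List.drop_subset _ _ hr)) prev
          (List.mem_of_mem_head? (Option.mem_def.mpr hp))
      have hS : (List.replicate (t + 1) (List.replicate W (0 : Int))
          ++ (rdpRows W (matrix.drop (t + 1))).map List.reverse).length = H := by
        simp [rdpRows_length_list, hdl]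
        omega
      have hb : ∀ prev, (rdpRows W (matrix.drop (t + 1))).head? = some prev →
          (List.replicate (t + 1) (List.replicate W (0 : Int))
            ++ (rdpRows W (matrix.drop (t + 1))).map List.reverse).getD (t + 1) [] = prev.reverse := by
        intro prev hp
        obtain ⟨ys, hys⟩ := List.head?_eq_some_iff.mp hp
        rw [List.getD_eq_getElem?_getD, List.getElem?_append_right (by simp), hys]
        simp
      have hrowt : (List.replicate (t + 1) (List.replicate W (0 : Int))
          ++ (rdpRows W (matrix.drop (t + 1))).map List.reverse).getD t []
          = List.replicate W (0 : Int)
            ++ ((rdpRow W ((rdpRows W (matrix.drop (t + 1))).head?) (matrix.getD t [])).take (W - W)).reverse := by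
        rw [List.getD_eq_getElem?_getD, List.getElem?_append_left (by simp)]
        simp
      rw [inner_go matrix W H hW hH t htH _ hbm hplen (hrows _ hmemt) W (le_refl W) _ hS hb
        (List.replicate W (0 : Int)) (by simp) hrowt]
      have hdropt : matrix.drop t = matrix.getD t [] :: matrix.drop (t + 1) := by
        rw [List.getD_eq_getElem _ _ (by omega)]
        exact List.drop_eq_getElem_cons (by omega)
      rw [hdropt]
      simp only [rdpRows, List.map_cons]
      rw [List.replicate_succ', List.append_assoc, List.set_append_right _ _ (by simp)]
      simp

-- ---- the reversed dp rows are dpI values ----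
lemma rdp_dpI_none (matrix : List (List Int)) (W H t : Nat) (hW : 1 ≤ W)
    (ht : t + 1 = H) (hrowW : W ≤ (matrix.getD t []).length) :
    ∀ i, i < W → (rdpRow W none (matrix.getD t [])).getD i 0
      = dpI matrix (H : Int) (W : Int) (t : Int) ((W - 1 - i : Nat) : Int) := by
  intro i
  induction i with
  | zero =>
      intro hi
      rw [rdpRow_none_zero, PySem.List.pyGetD_zero, take_rev_getD_zero _ W hW hrowW]
      have hyD : ¬ ((t : Int) + 1 < (H : Int)) := by omega
      have hxR : ¬ (((W - 1 - 0 : Nat) : Int) + 1 < (W : Int)) := by omega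
      rw [dpI_corner hyD hxR]
      simp
  | succ i ih =>
      intro hi
      rw [rdpRow_none_succ W _ i hi hrowW, ih (by omega), rev_getD W _ (i + 1) hrowW hi]
      have hyD : ¬ ((t : Int) + 1 < (H : Int)) := by omega
      have hxR : (((W - 1 - (i + 1) : Nat) : Int) + 1 < (W : Int)) := by omega
      rw [dpI_right hyD hxR]
      have hx1 : ((W - 1 - (i + 1) : Nat) : Int) + 1 = ((W - 1 - i : Nat) : Int) := by omega
      rw [hx1]
      simp

lemma rdp_dpI_some (matrix : List (List Int)) (W H t : Nat) (hW : 1 ≤ W)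
    (ht : t + 1 < H) (hrowW : W ≤ (matrix.getD t []).length) (prev : List Int)
    (hplen : prev.length = W)
    (hprev : ∀ j, j < W → prev.getD j 0
      = dpI matrix (H : Int) (W : Int) ((t + 1 : Nat) : Int) ((W - 1 - j : Nat) : Int)) :
    ∀ i, i < W → (rdpRow W (some prev) (matrix.getD t [])).getD i 0
      = dpI matrix (H : Int) (W : Int) (t : Int) ((W - 1 - i : Nat) : Int) := by
  have hc1 : ((t + 1 : Nat) : Int) = (t : Int) + 1 := by push_cast; ring
  rw [hc1] at hprev
  intro i
  induction i with
  | zero =>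
      intro hi
      rw [rdpRow_some_zero, PySem.List.pyGetD_zero, PySem.List.pyGetD_zero,
        take_rev_getD_zero _ W hW hrowW, hprev 0 (by omega)]
      have hyD : ((t : Int) + 1 < (H : Int)) := by omega
      have hxR : ¬ (((W - 1 - 0 : Nat) : Int) + 1 < (W : Int)) := by omega
      rw [dpI_down hyD hxR]
      simp
  | succ i ih =>
      intro hi
      rw [rdpRow_some_succ W prev _ i hi hrowW hplen, ih (by omega),
        rev_getD W _ (i + 1) hrowW hi, hprev (i + 1) hi]
      have hyD : ((t : Int) + 1 < (H : Int)) := by omega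
      have hxR : (((W - 1 - (i + 1) : Nat) : Int) + 1 < (W : Int)) := by omega
      rw [dpI_interior hyD hxR]
      have hx1 : ((W - 1 - (i + 1) : Nat) : Int) + 1 = ((W - 1 - i : Nat) : Int) := by omega
      rw [hx1]
      simp


lemma rdp_dpI (matrix : List (List Int)) (W H : Nat) (hW : 1 ≤ W) (hH : matrix.length = H)
    (hrows : ∀ r ∈ matrix, W ≤ r.length) :
    ∀ n t, t + n = H → 1 ≤ n → ∀ i, i < W →
      ((rdpRows W (matrix.drop t)).headI).getD i 0
        = dpI matrix (H : Int) (W : Int) (t : Int) ((W - 1 - i : Nat) : Int) := by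
  intro n
  induction n with
  | zero => intro t _ h1; exact absurd h1 (by omega)
  | succ n ihn =>
      intro t ht _ i hi
      have htH : t < H := by omega
      have hdropt : matrix.drop t = matrix.getD t [] :: matrix.drop (t + 1) := by
        rw [List.getD_eq_getElem _ _ (by omega)]
        exact List.drop_eq_getElem_cons (by omega)
      have hrowmem : matrix.getD t [] ∈ matrix := by
        rw [List.getD_eq_getElem _ _ (by omega)]
        exact List.getElem_mem _
      have hrowW : W ≤ (matrix.getD t []).length := hrows _ hrowmem
      rw [hdropt]
      by_cases hn : n = 0
      · subst hn
        have hdrop1 : matrix.drop (t + 1) = [] := List.drop_eq_nil_of_le (by omega)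
        rw [hdrop1]
        simp only [rdpRows, List.head?_nil, List.headI_cons]
        exact rdp_dpI_none matrix W H t hW (by omega) hrowW i hi
      · have ht1 : t + 1 < H := by omega
        have hdropt1 : matrix.drop (t + 1) = matrix.getD (t + 1) [] :: matrix.drop (t + 2) := by
          rw [List.getD_eq_getElem _ _ (by omega)]
          exact List.drop_eq_getElem_cons (by omega)
        have hne1 : rdpRows W (matrix.drop (t + 1)) ≠ [] := by
          rw [hdropt1]
          simp [rdpRows]
        have hhead : (rdpRows W (matrix.drop (t + 1))).head?
            = some ((rdpRows W (matrix.drop (t + 1))).headI) := by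
          cases hcase : rdpRows W (matrix.drop (t + 1)) with
          | nil => exact absurd hcase hne1
          | cons a l => simp
        have hplen : ((rdpRows W (matrix.drop (t + 1))).headI).length = W := by
          apply rdpRows_length W hW _ (fun r hr => hrows r (List.drop_subset _ _ hr))
          exact List.mem_of_mem_head? (Option.mem_def.mpr hhead)
        have hprev : ∀ j, j < W →
            ((rdpRows W (matrix.drop (t + 1))).headI).getD j 0
              = dpI matrix (H : Int) (W : Int) ((t + 1 : Nat) : Int) ((W - 1 - j : Nat) : Int) :=
          fun j hj => ihn (t + 1) (by omega) (by omega) j hj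
        simp only [rdpRows, hhead, List.headI_cons]
        exact rdp_dpI_some matrix W H t hW ht1 hrowW _ hplen hprev i hi

lemma main_eq (matrix : List (List Int)) (hpre : Pre_initialVal matrix) :
    initialVal matrix = initialVal_alt matrix := by
  have hpre' := hpre
  obtain ⟨hne, hw1, hrows⟩ := hpre
  cases matrix with
  | nil => exact absurd rfl hne
  | cons r0 rest =>
      simp only [List.headI] at hw1 hrows
      have hR0len : (rdpRow r0.length ((rdpRows r0.length rest).head?) r0).length = r0.length := by
        apply rdpRow_length _ _ _ hw1 (le_refl _)
        intro prev hp
        exact rdpRows_length r0.length hw1 rest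
          (fun r hr => hrows r (List.mem_cons_of_mem _ hr)) prev
          (List.mem_of_mem_head? (Option.mem_def.mpr hp))
      -- A side: the table fill produces the reversed dp rows
      have houter := outer_go (r0 :: rest) r0.length (r0 :: rest).length hw1 rfl hrows
        ((r0 :: rest).length) 0 (by omega)
      simp only [Nat.cast_zero, zero_sub, List.replicate_zero, List.drop_zero,
        List.nil_append] at houter
      have hdp0 : (PySem.List.pyRange 0 (((r0 :: rest).length : Nat) : Int) 1).map
            (fun _ => (PySem.List.pyRange 0 ((r0.length : Nat) : Int) 1).map (fun _ => (0 : Int)))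
          = List.replicate (r0 :: rest).length (List.replicate r0.length (0 : Int)) := by
        rw [List.map_const', List.map_const']
        simp [PySem.List.length_pyRange_one]
      simp only [initialVal, PySem.List.pyGetD_zero_cons]
      rw [hdp0, houter]
      simp only [rdpRows, List.map_cons, PySem.List.pyGetD_zero, List.getD_cons_zero]
      rw [getD_reverse _ 0 (by omega), hR0len]
      -- the top-left dp entry is dpI 0 0
      have hmain := rdp_dpI (r0 :: rest) r0.length (r0 :: rest).length hw1 rfl hrows
        ((r0 :: rest).length) 0 (by omega) (by simp) (r0.length - 1) (by omega)
      simp only [List.drop_zero, rdpRows, List.headI_cons, Nat.cast_zero] at hmain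
      have hidx : r0.length - 1 - 0 = r0.length - 1 := by omega
      rw [hidx, hmain]
      -- B side
      rw [alt_eq_dpI _ hpre']
      have h0 : ((r0.length - 1 - (r0.length - 1) : Nat) : Int) = 0 := by omega
      rw [h0]
      simp only [PySem.List.pyGetD_zero_cons]

-- ===== VERDICT (by name: the statement is the Claim_ definition above) =====
theorem initialVal_spec : Claim_equal_initialVal := by
  intro matrix _ hpre
  exact main_eq matrix hpre
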